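-- pv_equiv track=rewrite | github.com/HashirImteyaz/Ask_DB | src/core/data_processing/multi_retrieval_system.py | _generate_table_business_context
-- ===== SOURCE A (Python) =====
-- from typing import Dict, List, Optional, Tuple, Any
--
-- def _generate_table_business_context(table_name: str, columns: List[Dict], table_desc: str) -> str:
--     """Generate business context for tables."""
--     context = []
--     table_lower = table_name.lower()
--
--     # Identify table purpose based on name and columns
--     if any(word in table_lower for word in ['order', 'sale', 'transaction', 'purchase']):
--         context.append("Transactional data for sales/order analysis")
--     elif any(word in table_lower for word in ['customer', 'client', 'user']):
--         context.append("Customer/user master data")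
--     elif any(word in table_lower for word in ['product', 'item', 'inventory']):
--         context.append("Product/inventory master data")
--     elif any(word in table_lower for word in ['employee', 'staff', 'person']):
--         context.append("Employee/personnel data")
--
--     # Identify data pattern
--     has_id = any('id' in col['name'].lower() for col in columns)
--     has_dates = any(word in col['name'].lower() for col in columns for word in ['date', 'time', 'created'])
--     has_amounts = any(word in col['name'].lower() for col in columns for word in ['amount', 'price', 'cost', 'total'])
--
--     if has_id and has_dates and has_amounts:
--         context.append("Contains transactional records with identifiers, timestamps, and monetary values")
--     elif has_id and has_dates:
--         context.append("Event or activity tracking table")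
--     elif has_id:
--         context.append("Reference or master data table")
--
--     return "; ".join(context)
-- ===== SOURCE B (Python) =====
-- # B: inverted indexing -- one pass over columns builds the SET of interesting
-- # keywords that occur in any column name; the three flags become membership /
-- # disjointness tests on that index.  Name classification is a recursive
-- # first-match over the group list and the data-pattern message is picked by
-- # nested conditionals.  Same return value wherever every column has a 'name' key.
-- _NAME_GROUPS = [
--     ("Transactional data for sales/order analysis", ('order', 'sale', 'transaction', 'purchase')),
--     ("Customer/user master data", ('customer', 'client', 'user')),
--     ("Product/inventory master data", ('product', 'item', 'inventory')),
--     ("Employee/personnel data", ('employee', 'staff', 'person')),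
-- ]
-- _COL_KEYWORDS = ('id', 'date', 'time', 'created', 'amount', 'price', 'cost', 'total')
--
-- def _classify_name(table_lower, groups):
--     if not groups:
--         return []
--     label, words = groups[0]
--     if any(w in table_lower for w in words):
--         return [label]
--     return _classify_name(table_lower, groups[1:])
--
-- def _generate_table_business_context(table_name, columns, table_desc):
--     hits = set()
--     for col in columns:
--         n = col['name'].lower()
--         for w in _COL_KEYWORDS:
--             if w in n:
--                 hits.add(w)
--     parts = _classify_name(table_name.lower(), _NAME_GROUPS)
--     if 'id' in hits:
--         if not hits.isdisjoint(('date', 'time', 'created')):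
--             if not hits.isdisjoint(('amount', 'price', 'cost', 'total')):
--                 parts.append("Contains transactional records with identifiers, timestamps, and monetary values")
--             else:
--                 parts.append("Event or activity tracking table")
--         else:
--             parts.append("Reference or master data table")
--     return "; ".join(parts)
-- ===== Notes on version B (the rewrite author's own statement) =====
-- stated objective: alternative
-- what changed: Inverts the column scans: one pass builds a set-index of which interesting keywords occur in any column name, so the three flags become membership/disjointness tests on that set; the name classification becomes a recursive first-match over a group list and the data-pattern message is chosen by nested conditionals instead of a flat conjunction chain.
import Mathlib
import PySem

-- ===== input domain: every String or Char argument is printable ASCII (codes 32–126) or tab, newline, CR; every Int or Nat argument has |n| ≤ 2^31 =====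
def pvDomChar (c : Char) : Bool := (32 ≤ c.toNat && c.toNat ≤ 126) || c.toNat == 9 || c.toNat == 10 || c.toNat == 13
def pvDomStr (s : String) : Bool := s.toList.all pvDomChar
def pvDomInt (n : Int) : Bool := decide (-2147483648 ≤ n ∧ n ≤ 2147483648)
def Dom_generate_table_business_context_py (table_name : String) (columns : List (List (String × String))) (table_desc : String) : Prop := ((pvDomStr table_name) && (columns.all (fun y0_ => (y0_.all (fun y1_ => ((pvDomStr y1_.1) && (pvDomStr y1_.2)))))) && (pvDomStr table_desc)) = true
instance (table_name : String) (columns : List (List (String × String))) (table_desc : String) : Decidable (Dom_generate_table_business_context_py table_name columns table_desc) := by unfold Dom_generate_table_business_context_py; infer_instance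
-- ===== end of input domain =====

-- B inverts A's three any() scans over columns: one pass builds the set of matched keywords,
-- the flags are membership/disjointness tests on it; name classification is recursive first-match.


-- col['name'] : exact on Pre_ (the key is present there; Python raises KeyError otherwise,
-- and exactly those inputs are excluded by Pre_).
def pvColName (col : List (String × String)) : String :=
  (PySem.Dict.ofList col).getD "name" ""

-- ===== PORT A =====
def generate_table_business_context_py (table_name : String) (columns : List (List (String × String))) (table_desc : String) : String :=
  let context : List String := []
  let table_lower := PySem.Str.lower table_name
  let context :=
    if ["order", "sale", "transaction", "purchase"].any (fun w => PySem.Str.isIn w table_lower) then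
      context ++ ["Transactional data for sales/order analysis"]
    else if ["customer", "client", "user"].any (fun w => PySem.Str.isIn w table_lower) then
      context ++ ["Customer/user master data"]
    else if ["product", "item", "inventory"].any (fun w => PySem.Str.isIn w table_lower) then
      context ++ ["Product/inventory master data"]
    else if ["employee", "staff", "person"].any (fun w => PySem.Str.isIn w table_lower) then
      context ++ ["Employee/personnel data"]
    else context
  let has_id := columns.any (fun col => PySem.Str.isIn "id" (PySem.Str.lower (pvColName col)))
  let has_dates := columns.any (fun col => ["date", "time", "created"].any (fun w => PySem.Str.isIn w (PySem.Str.lower (pvColName col))))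
  let has_amounts := columns.any (fun col => ["amount", "price", "cost", "total"].any (fun w => PySem.Str.isIn w (PySem.Str.lower (pvColName col))))
  let context :=
    if has_id && has_dates && has_amounts then
      context ++ ["Contains transactional records with identifiers, timestamps, and monetary values"]
    else if has_id && has_dates then
      context ++ ["Event or activity tracking table"]
    else if has_id then
      context ++ ["Reference or master data table"]
    else context
  PySem.Str.join "; " context

-- ===== PORT B =====
def pvNameGroups : List (String × List String) :=
  [("Transactional data for sales/order analysis", ["order", "sale", "transaction", "purchase"]),
   ("Customer/user master data", ["customer", "client", "user"]),
   ("Product/inventory master data", ["product", "item", "inventory"]),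
   ("Employee/personnel data", ["employee", "staff", "person"])]

def pvColKeywords : List String :=
  ["id", "date", "time", "created", "amount", "price", "cost", "total"]

-- recursive first-match over the group list
def pvClassifyName (table_lower : String) : List (String × List String) → List String
  | [] => []
  | (label, words) :: rest =>
    if words.any (fun w => PySem.Str.isIn w table_lower) then [label]
    else pvClassifyName table_lower rest

-- one pass over columns: the set of interesting keywords occurring in any column name
def pvHits (columns : List (List (String × String))) : PySem.Set String :=
  columns.foldl
    (fun s col =>
      let n := PySem.Str.lower (pvColName col)
      pvColKeywords.foldl (fun s w => if PySem.Str.isIn w n then PySem.Set.add s w else s) s)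
    PySem.Set.empty

def generate_table_business_context_py_alt (table_name : String) (columns : List (List (String × String))) (table_desc : String) : String :=
  let hits := pvHits columns
  let parts := pvClassifyName (PySem.Str.lower table_name) pvNameGroups
  let parts :=
    if PySem.Set.contains hits "id" then
      if !PySem.Set.isdisjoint hits ["date", "time", "created"] then
        if !PySem.Set.isdisjoint hits ["amount", "price", "cost", "total"] then
          parts ++ ["Contains transactional records with identifiers, timestamps, and monetary values"]
        else
          parts ++ ["Event or activity tracking table"]
      else
        parts ++ ["Reference or master data table"]
    else parts
  PySem.Str.join "; " parts

-- ===== PRECONDITION & SPEC =====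
-- Pre_ excludes columns lacking a 'name' key: there Python A raises KeyError (except when
-- every any() short-circuits before reaching such a column, an accident of scan order) and B raises KeyError.
def Pre_generate_table_business_context_py (table_name : String) (columns : List (List (String × String))) (table_desc : String) : Prop :=
  ∀ col ∈ columns, (PySem.Dict.ofList col).contains "name" = true
instance (table_name : String) (columns : List (List (String × String))) (table_desc : String) : Decidable (Pre_generate_table_business_context_py table_name columns table_desc) := by unfold Pre_generate_table_business_context_py; infer_instance

def pvWitness_generate_table_business_context_py : String × (List (List (String × String))) × String :=
  ("orders", [[("name", "id")], [("name", "date"), ("type", "t")]], "desc")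

def Spec_generate_table_business_context_py (table_name : String) (columns : List (List (String × String))) (table_desc : String) (out : String) : Prop := out = generate_table_business_context_py_alt table_name columns table_desc
instance (table_name : String) (columns : List (List (String × String))) (table_desc : String) (out : String) : Decidable (Spec_generate_table_business_context_py table_name columns table_desc out) := by unfold Spec_generate_table_business_context_py; infer_instance

-- ===== CLAIM =====
def Claim_equal_generate_table_business_context_py : Prop := ∀ (table_name : String) (columns : List (List (String × String))) (table_desc : String), Dom_generate_table_business_context_py table_name columns table_desc → Pre_generate_table_business_context_py table_name columns table_desc → Spec_generate_table_business_context_py table_name columns table_desc (generate_table_business_context_py table_name columns table_desc)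

-- ===== LEMMAS AND PROOFS =====

-- inner fold of pvHits: which keywords of a single column name end up in the set
theorem mem_innerfold (n : String) (kws : List String) (s : PySem.Set String) (w : String) :
    w ∈ kws.foldl (fun s w' => if PySem.Str.isIn w' n then PySem.Set.add s w' else s) s ↔
      w ∈ s ∨ (w ∈ kws ∧ PySem.Str.isIn w n = true) := by
  induction kws generalizing s with
  | nil => simp
  | cons k ks ih =>
    simp only [List.foldl_cons]
    rw [ih]
    by_cases h : PySem.Str.isIn k n = true
    · simp only [if_pos h, PySem.Set.mem_add, List.mem_cons]
      constructor
      · rintro (⟨hs | rfl⟩ | ⟨hk, hi⟩)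
        · exact Or.inl hs
        · exact Or.inr ⟨Or.inl rfl, h⟩
        · exact Or.inr ⟨Or.inr hk, hi⟩
      · rintro (hs | ⟨rfl | hk, hi⟩)
        · exact Or.inl (Or.inl hs)
        · exact Or.inl (Or.inr rfl)
        · exact Or.inr ⟨hk, hi⟩
    · simp only [if_neg h, List.mem_cons]
      constructor
      · rintro (hs | ⟨hk, hi⟩)
        · exact Or.inl hs
        · exact Or.inr ⟨Or.inr hk, hi⟩
      · rintro (hs | ⟨rfl | hk, hi⟩)
        · exact Or.inl hs
        · exact absurd hi h
        · exact Or.inr ⟨hk, hi⟩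

-- the whole index: w ∈ pvHits columns ↔ w is an interesting keyword occurring in some column name
theorem mem_pvHits_gen (columns : List (List (String × String))) (s : PySem.Set String) (w : String) :
    w ∈ columns.foldl
        (fun s col =>
          let n := PySem.Str.lower (pvColName col)
          pvColKeywords.foldl (fun s w => if PySem.Str.isIn w n then PySem.Set.add s w else s) s) s ↔
      w ∈ s ∨ (w ∈ pvColKeywords ∧
        ∃ col ∈ columns, PySem.Str.isIn w (PySem.Str.lower (pvColName col)) = true) := by
  induction columns generalizing s with
  | nil => simp
  | cons c cs ih =>
    simp only [List.foldl_cons]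
    rw [ih, mem_innerfold]
    constructor
    · rintro ((hs | ⟨hk, hi⟩) | ⟨hk, col, hc, hi⟩)
      · exact Or.inl hs
      · exact Or.inr ⟨hk, c, List.mem_cons_self .., hi⟩
      · exact Or.inr ⟨hk, col, List.mem_cons_of_mem _ hc, hi⟩
    · rintro (hs | ⟨hk, col, hc, hi⟩)
      · exact Or.inl (Or.inl hs)
      · rcases List.mem_cons.mp hc with rfl | hc
        · exact Or.inl (Or.inr ⟨hk, hi⟩)
        · exact Or.inr ⟨hk, col, hc, hi⟩

theorem mem_pvHits (columns : List (List (String × String))) (w : String) :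
    w ∈ pvHits columns ↔
      w ∈ pvColKeywords ∧
        ∃ col ∈ columns, PySem.Str.isIn w (PySem.Str.lower (pvColName col)) = true := by
  unfold pvHits
  rw [mem_pvHits_gen]
  simp [PySem.Set.empty]

-- the three flags of A, recovered from the index
theorem contains_pvHits_id (columns : List (List (String × String))) :
    PySem.Set.contains (pvHits columns) "id" =
      columns.any (fun col => PySem.Str.isIn "id" (PySem.Str.lower (pvColName col))) := by
  rw [Bool.eq_iff_iff, PySem.Set.contains_iff, mem_pvHits, List.any_eq_true]
  constructor
  · rintro ⟨_, col, hc, hi⟩; exact ⟨col, hc, hi⟩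
  · rintro ⟨col, hc, hi⟩; exact ⟨by decide, col, hc, hi⟩

theorem not_isdisjoint_pvHits (columns : List (List (String × String))) (ws : List String)
    (hws : ∀ w ∈ ws, w ∈ pvColKeywords) :
    (!PySem.Set.isdisjoint (pvHits columns) ws) =
      columns.any (fun col => ws.any (fun w => PySem.Str.isIn w (PySem.Str.lower (pvColName col)))) := by
  rw [Bool.eq_iff_iff, Bool.not_eq_true', Bool.eq_false_iff, Ne, PySem.Set.isdisjoint_iff,
      List.any_eq_true]
  constructor
  · intro hnd
    push_neg at hnd
    obtain ⟨x, hxh, hxw⟩ := hnd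
    rcases (mem_pvHits _ _).mp hxh with ⟨_, col, hc, hi⟩
    exact ⟨col, hc, List.any_eq_true.mpr ⟨x, hxw, hi⟩⟩
  · rintro ⟨col, hc, h⟩ hd
    rcases List.any_eq_true.mp h with ⟨w, hw, hi⟩
    exact hd w ((mem_pvHits _ _).mpr ⟨hws w hw, col, hc, hi⟩) hw

-- ===== VERDICT =====
theorem generate_table_business_context_py_spec : Claim_equal_generate_table_business_context_py := by
  intro table_name columns table_desc _hdom _hpre
  unfold Spec_generate_table_business_context_py
  simp only [generate_table_business_context_py, generate_table_business_context_py_alt,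
    contains_pvHits_id,
    not_isdisjoint_pvHits columns ["date", "time", "created"] (by decide),
    not_isdisjoint_pvHits columns ["amount", "price", "cost", "total"] (by decide),
    pvClassifyName, pvNameGroups, List.nil_append]
  cases columns.any (fun col => PySem.Str.isIn "id" (PySem.Str.lower (pvColName col))) <;>
  cases columns.any (fun col => ["date", "time", "created"].any (fun w => PySem.Str.isIn w (PySem.Str.lower (pvColName col)))) <;>
  cases columns.any (fun col => ["amount", "price", "cost", "total"].any (fun w => PySem.Str.isIn w (PySem.Str.lower (pvColName col)))) <;>
    simp
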